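-- pv_equiv track=rewrite | github.com/AJlearner46/Call_handle_analyze_agent | app/services/agent_service.py | is_decline
-- ===== SOURCE A (Python) =====
-- def is_decline(text: str) -> bool:
--     lowered = text.lower()
--     decline_phrases = [
--         "don't want",
--         "do not want",
--         "no longer",
--         "not interested",
--         "none of those",
--         "none of these",
--         "forget it",
--         "not available",
--         "no slots",
--         "can't make it",
--         "cant make it",
--     ]
--     return any(phrase in lowered for phrase in decline_phrases)
-- ===== SOURCE B (Python) =====
-- def is_decline(text: str) -> bool:
--     # Single left-to-right scan: at each position try every phrase with
--     # startswith, instead of one full substring search per phrase.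
--     lowered = text.lower()
--     phrases = (
--         "don't want",
--         "do not want",
--         "no longer",
--         "not interested",
--         "none of those",
--         "none of these",
--         "forget it",
--         "not available",
--         "no slots",
--         "can't make it",
--         "cant make it",
--     )
--     for i in range(len(lowered)):
--         for p in phrases:
--             if lowered.startswith(p, i):
--                 return True
--     return False
-- ===== Notes on version B (the rewrite author's own statement) =====
-- stated objective: alternative
-- what changed: Replaces eleven independent full-text substring searches (one per phrase) with a single left-to-right scan of the text that tests all phrases by startswith at each position.
import Mathlib
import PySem

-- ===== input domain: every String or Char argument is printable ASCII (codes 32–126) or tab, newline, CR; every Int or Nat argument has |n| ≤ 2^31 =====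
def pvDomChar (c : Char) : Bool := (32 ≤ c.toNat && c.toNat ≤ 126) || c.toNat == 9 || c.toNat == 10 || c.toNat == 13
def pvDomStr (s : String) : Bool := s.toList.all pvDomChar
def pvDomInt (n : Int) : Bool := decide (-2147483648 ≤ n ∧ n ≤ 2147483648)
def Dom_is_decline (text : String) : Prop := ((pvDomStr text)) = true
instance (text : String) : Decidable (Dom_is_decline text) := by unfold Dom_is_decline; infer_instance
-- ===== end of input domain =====

-- B replaces eleven independent full-text substring searches with one left-to-right
-- scan testing every phrase by startswith at each position (alternative decomposition, same cost).


def pvPhrases : List String :=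
  ["don't want", "do not want", "no longer", "not interested", "none of those",
   "none of these", "forget it", "not available", "no slots", "can't make it",
   "cant make it"]

-- ===== PORT A =====
def is_decline (text : String) : Bool :=
  let lowered := PySem.Str.lower text
  pvPhrases.any (fun phrase => PySem.Str.isIn phrase lowered)

-- ===== PORT B =====
-- structural recursion over the suffixes of the lowered text = the loop 'for i in range(len(lowered))'
def pvScan : List Char → Bool
  | [] => false
  | c :: rest =>
      if pvPhrases.any (fun p => PySem.Chars.startswith (c :: rest) p.toList) then true
      else pvScan rest

def is_decline_alt (text : String) : Bool :=
  let lowered := PySem.Str.lower text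
  pvScan lowered.toList

-- ===== PRECONDITION & SPEC =====
def Spec_is_decline (text : String) (out : Bool) : Prop := out = is_decline_alt text
instance (text : String) (out : Bool) : Decidable (Spec_is_decline text out) := by unfold Spec_is_decline; infer_instance

-- ===== CLAIM (what is proved, stated in full; the proofs are below) =====
def Claim_equal_is_decline : Prop := ∀ (text : String), Dom_is_decline text → Spec_is_decline text (is_decline text)

-- ===== LEMMAS AND PROOFS =====
theorem pvScan_eq_any_isIn (s : List Char) :
    pvScan s = pvPhrases.any (fun p => PySem.Chars.isIn p.toList s) := by
  apply Bool.coe_iff_coe.mp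
  induction s with
  | nil => decide
  | cons c rest ih =>
      simp only [pvScan, List.any_eq_true, PySem.Chars.isIn_iff_infix,
        PySem.Chars.startswith_iff, List.infix_cons_iff, Bool.if_true_left,
        Bool.or_eq_true, decide_eq_true_eq] at ih ⊢
      rw [ih]
      constructor
      · rintro (⟨p, hp, h⟩ | ⟨p, hp, h⟩)
        exacts [⟨p, hp, .inl h⟩, ⟨p, hp, .inr h⟩]
      · rintro ⟨p, hp, h | h⟩
        exacts [.inl ⟨p, hp, h⟩, .inr ⟨p, hp, h⟩]

-- ===== VERDICT (by name: the statement is the Claim_ definition above) =====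
theorem is_decline_spec : Claim_equal_is_decline := by
  intro text _
  unfold Spec_is_decline is_decline is_decline_alt
  rw [pvScan_eq_any_isIn]
  simp [PySem.Str.isIn]
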